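-- pv_equiv track=rewrite | github.com/AndreOliveiraMendes/colletor | app/config.py | resolve_run
-- ===== SOURCE A (Python) =====
-- def resolve_run(name, config):
--     run = config["runs"][name]
--
--     collectors = list(run.get("collectors", []))
--     processors = list(run.get("processors", []))
--
--     for included in run.get("include", []):
--         sub = resolve_run(included, config)
--         collectors += sub["collectors"]
--         processors += sub["processors"]
--
--     return {
--         "collectors": collectors,
--         "processors": processors
--     }
-- ===== SOURCE B (Python) =====
-- def resolve_run(name, config):
--     runs = config["runs"]
--     collectors = []
--     processors = []
--     stack = [name]
--     while stack:
--         current = stack.pop()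
--         run = runs[current]
--         collectors.extend(run.get("collectors", []))
--         processors.extend(run.get("processors", []))
--         stack.extend(reversed(run.get("include", [])))
--     return {"collectors": collectors, "processors": processors}
-- ===== Notes on version B (the rewrite author's own statement) =====
-- stated objective: alternative
-- what changed: Replaces the recursive pre-order merge by an iterative explicit-stack worklist with flat accumulator lists; includes are pushed reversed so pops keep the left-to-right pre-order, and no per-call intermediate dicts are built.
import Mathlib
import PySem

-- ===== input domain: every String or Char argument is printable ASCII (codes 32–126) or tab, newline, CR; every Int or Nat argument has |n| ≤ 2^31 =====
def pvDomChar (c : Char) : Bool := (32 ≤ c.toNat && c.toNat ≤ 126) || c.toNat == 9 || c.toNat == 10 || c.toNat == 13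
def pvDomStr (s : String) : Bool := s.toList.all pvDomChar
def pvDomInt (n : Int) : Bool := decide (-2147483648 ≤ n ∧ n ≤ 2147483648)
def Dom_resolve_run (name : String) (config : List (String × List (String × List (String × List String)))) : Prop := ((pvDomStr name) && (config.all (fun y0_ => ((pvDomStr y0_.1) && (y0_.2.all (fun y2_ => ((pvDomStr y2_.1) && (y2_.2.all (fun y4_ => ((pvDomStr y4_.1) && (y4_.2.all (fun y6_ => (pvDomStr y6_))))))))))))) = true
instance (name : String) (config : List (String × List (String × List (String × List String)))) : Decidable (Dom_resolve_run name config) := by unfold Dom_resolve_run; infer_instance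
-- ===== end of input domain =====

-- B replaces A's recursion by an explicit-stack worklist with flat accumulators (same visit order, same output).


-- ===== PORT A =====
-- dict.get(k, dflt) on an association list: first match, else the default (exact for the unique-key dicts of the convention)
def pvGetD {α : Type} (l : List (String × α)) (k : String) (dflt : α) : α :=
  (List.lookup k l).getD dflt

-- A's recursion, with a Nat fuel as termination guard only: under Pre_ (depth of the
-- include graph < runs.length + 1) the 0-fuel branch is never reached.
def pvGoA (runs : List (String × List (String × List String))) : Nat → String → List String × List String
  | 0, _ => ([], [])
  | d+1, name =>
    let run := pvGetD runs name []
    let collectors := pvGetD run "collectors" []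
    let processors := pvGetD run "processors" []
    (pvGetD run "include" []).foldl
      (fun acc inc =>
        let sub := pvGoA runs d inc
        (acc.1 ++ sub.1, acc.2 ++ sub.2))
      (collectors, processors)

def resolve_run (name : String) (config : List (String × List (String × List (String × List String)))) : List (String × List String) :=
  let runs := pvGetD config "runs" []
  let r := pvGoA runs (runs.length + 1) name
  [("collectors", r.1), ("processors", r.2)]

-- ===== PORT B =====
-- Source B's worklist loop.  Python pops from the END of the stack and pushes reversed(include);
-- here the TOP of the stack is the list head, so pop = head and push = include ++ rest
-- (the two reversals cancel).  Fuel is a termination guard only (never exhausted under Pre_).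
def pvGoB (runs : List (String × List (String × List String))) : Nat → List String → List String → List String → List String × List String
  | _, [], cols, pros => (cols, pros)
  | 0, _ :: _, cols, pros => (cols, pros)
  | f+1, n :: rest, cols, pros =>
    let run := pvGetD runs n []
    pvGoB runs f (pvGetD run "include" [] ++ rest)
      (cols ++ pvGetD run "collectors" [])
      (pros ++ pvGetD run "processors" [])

-- depth-bounded size of the include tree below a name (fuel bound for pvGoB, not part of Source B's logic)
def pvSize (runs : List (String × List (String × List String))) : Nat → String → Nat
  | 0, _ => 1
  | d+1, n => 1 + ((pvGetD (pvGetD runs n []) "include" []).map (pvSize runs d)).sum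

def resolve_run_alt (name : String) (config : List (String × List (String × List (String × List String)))) : List (String × List String) :=
  let runs := pvGetD config "runs" []
  let r := pvGoB runs (pvSize runs (runs.length + 1) name) [name] [] []
  [("collectors", r.1), ("processors", r.2)]

-- ===== PRECONDITION & SPEC =====
-- depth-bounded check of the include graph: every run name reachable from n is a key of runs
-- and every include path from n is shorter than the fuel (i.e. the reachable part is acyclic)
def pvOk (runs : List (String × List (String × List String))) : Nat → String → Bool
  | 0, _ => false
  | d+1, n =>
    match List.lookup n runs with
    | none => false
    | some run => (pvGetD run "include" []).all (pvOk runs d)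

-- Pre_ excludes exactly the inputs on which the Python A raises (KeyError on a missing
-- "runs" key, run name or included name) or never returns (RecursionError on a cyclic include graph).
def Pre_resolve_run (name : String) (config : List (String × List (String × List (String × List String)))) : Prop :=
  pvOk (pvGetD config "runs" []) ((pvGetD config "runs" []).length + 1) name = true
instance (name : String) (config : List (String × List (String × List (String × List String)))) : Decidable (Pre_resolve_run name config) := by unfold Pre_resolve_run; infer_instance

def pvWitness_resolve_run : String × (List (String × List (String × List (String × List String)))) :=
  ("x", [("runs", [("x", [("collectors", ["c"]), ("include", ["y"])]), ("y", [("processors", ["p"])])])])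

def Spec_resolve_run (name : String) (config : List (String × List (String × List (String × List String)))) (out : List (String × List String)) : Prop := out = resolve_run_alt name config
instance (name : String) (config : List (String × List (String × List (String × List String)))) (out : List (String × List String)) : Decidable (Spec_resolve_run name config out) := by unfold Spec_resolve_run; infer_instance

-- ===== CLAIM (what is proved, stated in full; the proofs are below) =====
def Claim_equal_resolve_run : Prop := ∀ (name : String) (config : List (String × List (String × List (String × List String)))), Dom_resolve_run name config → Pre_resolve_run name config → Spec_resolve_run name config (resolve_run name config)

-- ===== LEMMAS AND PROOFS =====

theorem pvOk_mono {runs : List (String × List (String × List String))} :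
    ∀ {d d' : Nat} {n : String}, d ≤ d' → pvOk runs d n = true → pvOk runs d' n = true := by
  intro d
  induction d with
  | zero => intro d' n _ h; simp [pvOk] at h
  | succ e ih =>
    intro d' n hle h
    obtain ⟨e', rfl⟩ : ∃ e', d' = e' + 1 := ⟨d' - 1, by omega⟩
    simp only [pvOk] at h ⊢
    cases hl : List.lookup n runs with
    | none => rw [hl] at h; simp at h
    | some run =>
      rw [hl] at h
      simp only [List.all_eq_true] at h ⊢
      intro x hx
      exact ih (by omega) (h x hx)

theorem pvGoA_stab {runs : List (String × List (String × List String))} :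
    ∀ {d d' : Nat} {n : String}, d ≤ d' → pvOk runs d n = true →
      pvGoA runs d' n = pvGoA runs d n := by
  intro d
  induction d with
  | zero => intro d' n _ h; simp [pvOk] at h
  | succ e ih =>
    intro d' n hle h
    obtain ⟨e', rfl⟩ : ∃ e', d' = e' + 1 := ⟨d' - 1, by omega⟩
    simp only [pvOk] at h
    cases hl : List.lookup n runs with
    | none => rw [hl] at h; simp at h
    | some run =>
      rw [hl] at h
      simp only [List.all_eq_true] at h
      have hrun : pvGetD runs n ([] : List (String × List String)) = run := by
        simp [pvGetD, hl]
      simp only [pvGoA, hrun]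
      exact PySem.List.foldl_congr_mem _ _ _ _
        (fun acc x hx => by rw [ih (by omega) (h x hx)])

theorem pvSize_stab {runs : List (String × List (String × List String))} :
    ∀ {d d' : Nat} {n : String}, d ≤ d' → pvOk runs d n = true →
      pvSize runs d' n = pvSize runs d n := by
  intro d
  induction d with
  | zero => intro d' n _ h; simp [pvOk] at h
  | succ e ih =>
    intro d' n hle h
    obtain ⟨e', rfl⟩ : ∃ e', d' = e' + 1 := ⟨d' - 1, by omega⟩
    simp only [pvOk] at h
    cases hl : List.lookup n runs with
    | none => rw [hl] at h; simp at h
    | some run =>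
      rw [hl] at h
      simp only [List.all_eq_true] at h
      have hrun : pvGetD runs n ([] : List (String × List String)) = run := by
        simp [pvGetD, hl]
      simp only [pvSize, hrun]
      congr 1
      apply congrArg
      exact List.map_congr_left (fun x hx => ih (by omega) (h x hx))

theorem pvSize_pos {runs : List (String × List (String × List String))} (d : Nat) (n : String) :
    1 ≤ pvSize runs d n := by
  cases d <;> simp [pvSize]

theorem pvFoldlPair (l : List String) (f : String → List String × List String) :
    ∀ (a b : List String),
      l.foldl (fun acc inc => let sub := f inc; (acc.1 ++ sub.1, acc.2 ++ sub.2)) (a, b)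
        = (a ++ l.flatMap (fun i => (f i).1), b ++ l.flatMap (fun i => (f i).2)) := by
  induction l with
  | nil => intro a b; simp
  | cons x xs ih => intro a b; simp only [List.foldl_cons, ih, List.flatMap_cons, List.append_assoc]

theorem pvGoA_succ (runs : List (String × List (String × List String))) (d : Nat) (n : String) :
    pvGoA runs (d+1) n
      = (pvGetD (pvGetD runs n []) "collectors" []
           ++ (pvGetD (pvGetD runs n []) "include" []).flatMap (fun i => (pvGoA runs d i).1),
         pvGetD (pvGetD runs n []) "processors" []
           ++ (pvGetD (pvGetD runs n []) "include" []).flatMap (fun i => (pvGoA runs d i).2)) := by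
  conv_lhs => rw [pvGoA]
  exact pvFoldlPair _ _ _ _

theorem pvMain (runs : List (String × List (String × List String))) :
    ∀ (fuel : Nat) (stack cols pros : List String),
      (∀ s ∈ stack, pvOk runs (runs.length + 1) s = true) →
      (stack.map (pvSize runs (runs.length + 1))).sum ≤ fuel →
      pvGoB runs fuel stack cols pros
        = (cols ++ stack.flatMap (fun s => (pvGoA runs (runs.length + 1) s).1),
           pros ++ stack.flatMap (fun s => (pvGoA runs (runs.length + 1) s).2)) := by
  intro fuel
  induction fuel with
  | zero =>
    intro stack cols pros hok hsz
    cases stack with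
    | nil => simp [pvGoB]
    | cons n rest =>
      exfalso
      have := pvSize_pos (runs := runs) (runs.length + 1) n
      simp only [List.map_cons, List.sum_cons] at hsz
      omega
  | succ f ih =>
    intro stack cols pros hok hsz
    cases stack with
    | nil => simp [pvGoB]
    | cons n rest =>
      have hn := hok n (by simp)
      simp only [pvOk] at hn
      cases hl : List.lookup n runs with
      | none => rw [hl] at hn; simp at hn
      | some run =>
        rw [hl] at hn
        simp only [List.all_eq_true] at hn
        have hrun : pvGetD runs n ([] : List (String × List String)) = run := by
          simp [pvGetD, hl]
        -- includes and their facts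
        set incs := pvGetD run "include" ([] : List String) with hincs
        have hokN : ∀ x ∈ incs, pvOk runs (runs.length + 1) x = true :=
          fun x hx => pvOk_mono (by omega) (hn x hx)
        have hszstab : ∀ x ∈ incs,
            pvSize runs (runs.length + 1) x = pvSize runs runs.length x :=
          fun x hx => pvSize_stab (by omega) (hn x hx)
        have hsz' : ((incs ++ rest).map (pvSize runs (runs.length + 1))).sum ≤ f := by
          have hn' : pvSize runs (runs.length + 1) n
              = 1 + (incs.map (pvSize runs runs.length)).sum := by
            simp [pvSize, hrun, hincs]
          have hmap : incs.map (pvSize runs (runs.length + 1))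
              = incs.map (pvSize runs runs.length) := List.map_congr_left hszstab
          simp only [List.map_cons, List.sum_cons, hn'] at hsz
          simp only [List.map_append, List.sum_append, hmap]
          omega
        have hok' : ∀ s ∈ incs ++ rest, pvOk runs (runs.length + 1) s = true := by
          intro s hs
          rcases List.mem_append.mp hs with h | h
          · exact hokN s h
          · exact hok s (by simp [h])
        -- unfold one step of pvGoB and apply ih
        simp only [pvGoB]
        rw [hrun]
        rw [ih (incs ++ rest) _ _ hok' hsz']
        -- characterize pvGoA at n
        have hA : pvGoA runs (runs.length + 1) n
            = (pvGetD run "collectors" [] ++ incs.flatMap (fun i => (pvGoA runs (runs.length + 1) i).1),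
               pvGetD run "processors" [] ++ incs.flatMap (fun i => (pvGoA runs (runs.length + 1) i).2)) := by
          have hstabA : ∀ x ∈ incs,
              pvGoA runs runs.length x = pvGoA runs (runs.length + 1) x :=
            fun x hx => (pvGoA_stab (by omega) (pvOk_mono (by omega) (hn x hx))).symm
          rw [pvGoA_succ, hrun, ← hincs]
          rw [List.flatMap_congr (fun x hx => congrArg Prod.fst (hstabA x hx)),
              List.flatMap_congr (fun x hx => congrArg Prod.snd (hstabA x hx))]
        simp only [List.flatMap_cons, List.flatMap_append, hA, List.append_assoc]

-- ===== VERDICT (by name: the statement is the Claim_ definition above) =====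
theorem resolve_run_spec : Claim_equal_resolve_run := by
  intro name config _ hpre
  unfold Spec_resolve_run resolve_run resolve_run_alt
  have h := pvMain (pvGetD config "runs" [])
      (pvSize (pvGetD config "runs" []) ((pvGetD config "runs" []).length + 1) name)
      [name] [] []
      (by intro s hs; simp at hs; subst hs; exact hpre)
      (by simp)
  simp only [h, List.flatMap_cons, List.flatMap_nil, List.append_nil, List.nil_append]
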